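-- pv_equiv track=rewrite | github.com/Shrutibrahma/EcoFlight_AI | backend/ai_radio.py | _overall_urgency
-- ===== SOURCE A (Python) =====
-- from typing import Dict, List, Optional
--
-- def _overall_urgency(alerts: List[Dict]) -> str:
--     for a in alerts:
--         if a.get("urgency") == "urgent":
--             return "urgent"
--     for a in alerts:
--         if a.get("urgency") == "advisory":
--             return "advisory"
--     return "routine"
-- ===== SOURCE B (Python) =====
-- def _overall_urgency(alerts):
--     priorities = {"urgent": 2, "advisory": 1}
--     best = 0
--     for a in alerts:
--         best = max(best, priorities.get(a.get("urgency"), 0))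
--     return {2: "urgent", 1: "advisory"}.get(best, "routine")
-- ===== Notes on version B (the rewrite author's own statement) =====
-- stated objective: simpler
-- what changed: Replaces A's two ordered membership scans with a single max-reduction over a numeric priority table (urgent=2, advisory=1, other=0), translating the maximum back to a label at the end.
import Mathlib
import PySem

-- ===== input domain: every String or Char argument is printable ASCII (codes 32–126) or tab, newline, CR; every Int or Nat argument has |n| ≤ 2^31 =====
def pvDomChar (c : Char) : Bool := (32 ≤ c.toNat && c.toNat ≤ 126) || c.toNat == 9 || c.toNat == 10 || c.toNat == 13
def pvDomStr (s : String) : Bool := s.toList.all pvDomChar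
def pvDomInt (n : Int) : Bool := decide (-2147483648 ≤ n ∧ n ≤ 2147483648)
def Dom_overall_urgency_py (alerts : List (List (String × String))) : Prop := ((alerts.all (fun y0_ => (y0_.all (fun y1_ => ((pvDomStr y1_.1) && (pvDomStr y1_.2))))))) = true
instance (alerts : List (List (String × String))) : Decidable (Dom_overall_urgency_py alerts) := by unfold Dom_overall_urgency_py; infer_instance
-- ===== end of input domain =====

-- B replaces A's two ordered membership scans with one max-reduction over a numeric priority table (objective: simpler).

-- ===== PORT A =====
-- a.get("urgency"): first-match lookup in the association list (exact for Python dict.get)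
def pvGetUrgency (d : List (String × String)) : Option String :=
  match d with
  | [] => none
  | (k, v) :: rest => if k == "urgency" then some v else pvGetUrgency rest

-- one of A's two scan loops: early-return on the first alert whose urgency equals lab
def pvScan (alerts : List (List (String × String))) (lab : String) : Bool :=
  match alerts with
  | [] => false
  | a :: rest => if pvGetUrgency a == some lab then true else pvScan rest lab

def overall_urgency_py (alerts : List (List (String × String))) : String :=
  if pvScan alerts "urgent" then "urgent"
  else if pvScan alerts "advisory" then "advisory"
  else "routine"

-- ===== PORT B =====
-- priorities.get(u, 0) for the literal table {"urgent": 2, "advisory": 1}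
def pvPrioOf (u : Option String) : Int :=
  if u == some "urgent" then 2 else if u == some "advisory" then 1 else 0

def overall_urgency_py_alt (alerts : List (List (String × String))) : String :=
  let best := alerts.foldl (fun b a => max b (pvPrioOf (pvGetUrgency a))) 0
  if best == 2 then "urgent" else if best == 1 then "advisory" else "routine"

-- ===== PRECONDITION & SPEC =====
def Spec_overall_urgency_py (alerts : List (List (String × String))) (out : String) : Prop := out = overall_urgency_py_alt alerts
instance (alerts : List (List (String × String))) (out : String) : Decidable (Spec_overall_urgency_py alerts out) := by unfold Spec_overall_urgency_py; infer_instance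

-- ===== CLAIM (what is proved, stated in full; the proofs are below) =====
def Claim_equal_overall_urgency_py : Prop := ∀ (alerts : List (List (String × String))), Dom_overall_urgency_py alerts → Spec_overall_urgency_py alerts (overall_urgency_py alerts)

-- ===== LEMMAS AND PROOFS =====

theorem pvPrioOf_nonneg (u : Option String) : 0 ≤ pvPrioOf u := by
  unfold pvPrioOf; split_ifs <;> omega

theorem pvBest_nonneg (alerts : List (List (String × String))) (b : Int) (hb : 0 ≤ b) :
    0 ≤ alerts.foldl (fun b a => max b (pvPrioOf (pvGetUrgency a))) b := by
  induction alerts generalizing b with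
  | nil => simpa using hb
  | cons a rest ih =>
      simp only [List.foldl_cons]
      exact ih _ (le_trans hb (le_max_left _ _))

theorem pvFold_shift (alerts : List (List (String × String))) (b : Int) (hb : 0 ≤ b) :
    alerts.foldl (fun b a => max b (pvPrioOf (pvGetUrgency a))) b
      = max b (alerts.foldl (fun b a => max b (pvPrioOf (pvGetUrgency a))) 0) := by
  induction alerts generalizing b with
  | nil => simp; omega
  | cons a rest ih =>
      simp only [List.foldl_cons]
      rw [ih _ (le_trans hb (le_max_left _ _)),
          ih _ (le_trans (pvPrioOf_nonneg _) (le_max_right _ _))]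
      have := pvBest_nonneg rest 0 le_rfl
      have := pvPrioOf_nonneg (pvGetUrgency a)
      omega

theorem pvBest_eq (alerts : List (List (String × String))) :
    alerts.foldl (fun b a => max b (pvPrioOf (pvGetUrgency a))) 0
      = if pvScan alerts "urgent" then 2
        else if pvScan alerts "advisory" then 1 else 0 := by
  induction alerts with
  | nil => simp [pvScan]
  | cons a rest ih =>
      simp only [List.foldl_cons, pvScan]
      rw [pvFold_shift rest _ (le_trans (pvPrioOf_nonneg _) (le_max_right _ _)), ih]
      unfold pvPrioOf
      split_ifs <;> simp_all

theorem overall_urgency_py_eq (alerts : List (List (String × String))) :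
    overall_urgency_py alerts = overall_urgency_py_alt alerts := by
  unfold overall_urgency_py overall_urgency_py_alt
  rw [pvBest_eq]
  split_ifs <;> simp_all

-- ===== VERDICT (by name: the statement is the Claim_ definition above) =====
theorem overall_urgency_py_spec : Claim_equal_overall_urgency_py := by
  intro alerts _
  unfold Spec_overall_urgency_py
  exact overall_urgency_py_eq alerts
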